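-- pv_equiv track=rewrite | github.com/ggramgyo/PS_STUDY | programmers/불량사용자.py | check
-- ===== SOURCE A (Python) =====
-- def check(user,ban):
--     for i in range(len(ban)):
--         if len(ban[i]) != len(user[i]):
--             return False
--         for j in range(len(ban[i])):
--             if ban[i][j] == "*":
--                 continue
--             elif ban[i][j] != user[i][j]:
--                 return False
--     return True
-- ===== SOURCE B (Python) =====
-- def check(user, ban):
--     # Segment the pattern at wildcards: split on '*' and check each literal
--     # segment occurs verbatim at its fixed offset in the user entry.
--     for b, u in zip(ban, user):
--         if len(b) != len(u):
--             return False
--         pos = 0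
--         for seg in b.split('*'):
--             if u[pos:pos + len(seg)] != seg:
--                 return False
--             pos += len(seg) + 1
--     return True
-- ===== Notes on version B (the rewrite author's own statement) =====
-- stated objective: faster
-- what changed: B splits each ban pattern on '*' into literal segments and checks each segment verbatim at its fixed offset of the user entry via slicing (delegating the scan to C-level str.split and slice comparison), instead of A's index-driven per-character wildcard comparison in Python bytecode.
-- outside the precondition, e.g. on check(['x'], ['ab', 'c']): A returns False, B returns False; on check(['a'], ['a', 'b']): A raises IndexError, B returns True
import Mathlib
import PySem

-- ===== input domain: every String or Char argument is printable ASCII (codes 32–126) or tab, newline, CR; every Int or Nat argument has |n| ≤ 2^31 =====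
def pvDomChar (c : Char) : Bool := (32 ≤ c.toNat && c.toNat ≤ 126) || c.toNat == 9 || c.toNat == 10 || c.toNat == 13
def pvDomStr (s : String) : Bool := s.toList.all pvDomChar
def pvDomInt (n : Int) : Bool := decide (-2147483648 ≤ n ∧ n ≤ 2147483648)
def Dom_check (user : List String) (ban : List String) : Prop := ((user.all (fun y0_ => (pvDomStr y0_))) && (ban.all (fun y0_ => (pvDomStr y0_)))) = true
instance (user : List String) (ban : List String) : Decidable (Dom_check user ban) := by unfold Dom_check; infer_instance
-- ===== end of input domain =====

-- B splits each pattern on '*' into literal segments and checks each segment verbatim at its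
-- fixed offset by slicing, instead of A's per-character wildcard comparison (objective: alternative).

-- ===== PORT A =====
-- inner 'for j in range(len(ban[i]))' loop with its early return False
def checkInner (b u : List Char) (j : Nat) : Bool :=
  if _ : j < b.length then
    if b.getD j ' ' = '*' then checkInner b u (j+1)
    else if b.getD j ' ' ≠ u.getD j ' ' then false
    else checkInner b u (j+1)
  else true
termination_by b.length - j

-- outer 'for i in range(len(ban))' loop (user[i] only reached with i < user.length under Pre_)
def checkOuter (user ban : List String) (i : Nat) : Bool :=
  if _ : i < ban.length then
    let b := (ban.getD i "").toList
    let u := (user.getD i "").toList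
    if b.length ≠ u.length then false
    else if checkInner b u 0 then checkOuter user ban (i+1) else false
  else true
termination_by ban.length - i

def check (user : List String) (ban : List String) : Bool := checkOuter user ban 0

-- ===== PORT B =====
-- inner "for seg in b.split('*')" loop; u[pos:pos+len(seg)] is PySem.List.slice,
-- b.split('*') for the one-char separator is List.splitOn '*'
def segLoop (u : List Char) : List (List Char) → Int → Bool
  | [], _ => true
  | seg :: rest, pos =>
    if PySem.List.slice u (some pos) (some (pos + (seg.length : Int))) ≠ seg then false
    else segLoop u rest (pos + (seg.length : Int) + 1)

-- 'for b, u in zip(ban, user)' loop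
def checkBLoop : List (String × String) → Bool
  | [] => true
  | (b, u) :: rest =>
    if b.toList.length ≠ u.toList.length then false
    else if segLoop u.toList (b.toList.splitOn '*') 0 then checkBLoop rest else false

def check_alt (user : List String) (ban : List String) : Bool :=
  checkBLoop (ban.zip user)

-- ===== PRECONDITION & SPEC =====
-- Pre_ excludes user lists shorter than ban: there Python A raises IndexError on the first
-- extra index it reaches (or returns False earlier, in which case B agrees anyway — see cites).
def Pre_check (user : List String) (ban : List String) : Prop := ban.length ≤ user.length
instance (user : List String) (ban : List String) : Decidable (Pre_check user ban) := by unfold Pre_check; infer_instance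
def pvWitness_check : List String × List String := (["frodo", "abc123"], ["fr*d*", "abc1**"])

def Spec_check (user : List String) (ban : List String) (out : Bool) : Prop := out = check_alt user ban
instance (user : List String) (ban : List String) (out : Bool) : Decidable (Spec_check user ban out) := by unfold Spec_check; infer_instance

-- ===== CLAIM (what is proved, stated in full; the proofs are below) =====
def Claim_equal_check : Prop := ∀ (user : List String) (ban : List String), Dom_check user ban → Pre_check user ban → Spec_check user ban (check user ban)

-- ===== LEMMAS AND PROOFS =====

-- proof-side intermediate: the wildcard mask of u by b
def maskB (b u : List Char) : List Char :=
  (b.zip u).map (fun p => if p.1 = '*' then '*' else p.2)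

lemma inner_eq_mask (b u : List Char) (h : b.length = u.length) (j : Nat) :
    checkInner b u j = (maskB (b.drop j) (u.drop j) = b.drop j : Bool) := by
  induction hn : b.length - j using Nat.strong_induction_on generalizing j with
  | _ n ih =>
    rw [checkInner]
    by_cases hj : j < b.length
    · have hju : j < u.length := h ▸ hj
      have hb : b.drop j = b[j] :: b.drop (j+1) := List.drop_eq_getElem_cons hj
      have hu : u.drop j = u[j] :: u.drop (j+1) := List.drop_eq_getElem_cons hju
      have hgb : b.getD j ' ' = b[j] := by simp [List.getD, List.getElem?_eq_getElem hj]
      have hgu : u.getD j ' ' = u[j] := by simp [List.getD, List.getElem?_eq_getElem hju]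
      have hrec := ih (b.length - (j+1)) (by omega) (j+1) rfl
      simp only [hj, hb, hu, hgb, hgu, dif_pos, maskB, List.zip_cons_cons,
        List.map_cons, List.cons.injEq]
      by_cases hstar : b[j] = '*'
      · simp [hstar, hrec, maskB]
      · by_cases heq : b[j] = u[j]
        · simp [hstar, heq.symm, hrec, maskB]
        · have hne : ¬ (u[j] = b[j]) := fun hh => heq hh.symm
          simp [hstar, heq, hne]
    · have hbd : b.drop j = [] := List.drop_eq_nil_of_le (by omega)
      have hud : u.drop j = [] := List.drop_eq_nil_of_le (by omega)
      simp [hj, hbd, hud, maskB]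

lemma mask_nostar (p : List Char) : ∀ (rest : List Char), '*' ∉ p → p.length = rest.length →
    maskB p rest = rest := by
  induction p with
  | nil =>
    intro rest _ hl
    cases rest with
    | nil => rfl
    | cons r rs => simp at hl
  | cons c cs ih =>
    intro rest hs hl
    cases rest with
    | nil => simp at hl
    | cons r rs =>
      have hc : c ≠ '*' := fun h => hs (h ▸ List.mem_cons_self ..)
      simp only [maskB, List.zip_cons_cons, List.map_cons, hc]
      exact congrArg (r :: ·) (ih rs (fun h => hs (List.mem_cons_of_mem _ h)) (by simpa using hl))

lemma mask_append (x y a b : List Char) (h : x.length = a.length) :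
    maskB (x ++ y) (a ++ b) = maskB x a ++ maskB y b := by
  simp [maskB, List.zip_append h]

lemma mh_id {α : Type} (l : List α) : l.modifyHead (fun x => x) = l := by
  cases l <;> simp

lemma seg_gen (b : List Char) : ∀ (p u rest : List Char), '*' ∉ p →
    (p ++ b).length = rest.length →
    segLoop (u ++ rest) ((b.splitOnP (· == '*')).modifyHead (p ++ ·)) ((u.length : Nat) : Int)
      = (maskB (p ++ b) rest = p ++ b : Bool) := by
  induction b with
  | nil =>
    intro p u rest hs hl
    simp only [List.append_nil] at hl
    rw [List.splitOnP_nil]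
    simp only [List.modifyHead, List.append_nil]
    rw [segLoop]
    have hslice : PySem.List.slice (u ++ rest) (some ((u.length : Nat) : Int))
        (some (((u.length : Nat) : Int) + ((p.length : Nat) : Int))) = rest := by
      rw [show ((u.length : Nat) : Int) + ((p.length : Nat) : Int) = ((u.length + p.length : Nat) : Int) by push_cast; ring]
      rw [PySem.List.slice_natCast]
      simp [List.take_of_length_le, hl.symm]
    rw [hslice]
    have hm : maskB p rest = rest := mask_nostar p rest hs hl
    by_cases he : rest = p
    · simp only [he, ne_eq, not_true_eq_false, if_false, segLoop]
      simp [he ▸ hm]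
    · simp [he, hm]
  | cons c b' ih =>
    intro p u rest hs hl
    rw [List.splitOnP_cons]
    by_cases hc : c = '*'
    · subst hc
      simp only [beq_self_eq_true, if_true, List.modifyHead, List.append_nil]
      rw [segLoop]
      -- decompose rest = r1 ++ d :: r2 with r1.length = p.length
      have hlen : rest.length = p.length + 1 + b'.length := by
        simp only [List.length_append, List.length_cons] at hl; omega
      have hdrop : (rest.drop p.length).length = 1 + b'.length := by
        rw [List.length_drop, hlen]; omega
      obtain ⟨d, r2, hdr⟩ : ∃ d r2, rest.drop p.length = d :: r2 := by
        cases hd : rest.drop p.length with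
        | nil => rw [hd] at hdrop; exact absurd hdrop (by simp; omega)
        | cons d r2 => exact ⟨d, r2, rfl⟩
      have hrest : rest = rest.take p.length ++ d :: r2 := by
        rw [← hdr, List.take_append_drop]
      set r1 := rest.take p.length with hr1
      have hr1len : r1.length = p.length := by
        rw [hr1, List.length_take, hlen]; omega
      have hr2len : r2.length = b'.length := by
        have := congrArg List.length hrest
        simp [hlen, hr1len] at this; omega
      have hslice : PySem.List.slice (u ++ rest) (some ((u.length : Nat) : Int))
          (some (((u.length : Nat) : Int) + ((p.length : Nat) : Int))) = r1 := by
        rw [show ((u.length : Nat) : Int) + ((p.length : Nat) : Int) = ((u.length + p.length : Nat) : Int) by push_cast; ring]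
        rw [PySem.List.slice_natCast]
        simp [hr1]
      rw [hslice]
      have hmask : maskB (p ++ '*' :: b') rest = r1 ++ '*' :: maskB b' r2 := by
        rw [hrest, mask_append p ('*' :: b') r1 (d :: r2) hr1len.symm,
          mask_nostar p r1 hs hr1len.symm]
        simp [maskB]
      have hiff : (maskB (p ++ '*' :: b') rest = p ++ '*' :: b') ↔ (r1 = p ∧ maskB b' r2 = b') := by
        rw [hmask]
        constructor
        · intro h
          have := List.append_inj h (by omega)
          refine ⟨this.1, ?_⟩
          have h2 := this.2
          simpa using h2
        · rintro ⟨h1, h2⟩; rw [h1, h2]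
      by_cases he : r1 = p
      · -- recurse with prefix [] and consumed u ++ r1 ++ [d]
        have hpos : ((u.length : Nat) : Int) + ((p.length : Nat) : Int) + 1
            = (((u ++ r1 ++ [d]).length : Nat) : Int) := by
          simp [hr1len]; ring_nf
        have hIH := ih [] (u ++ r1 ++ [d]) r2 (by simp) (by simpa using hr2len.symm)
        simp only [List.nil_append] at hIH
        rw [mh_id] at hIH
        rw [if_neg (by simp [he]), hpos]
        have harr : (u ++ r1 ++ [d]) ++ r2 = u ++ rest := by
          rw [hrest, he]; simp
        rw [harr] at hIH
        rw [hIH]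
        simp [hiff, he]
      · rw [if_pos (by simp [he])]
        have : ¬ (maskB (p ++ '*' :: b') rest = p ++ '*' :: b') := by
          rw [hiff]; rintro ⟨h1, _⟩; exact he h1
        simp [this]
    · have hcb : ¬ ((c == '*') = true) := by simpa using hc
      rw [if_neg hcb, List.modifyHead_modifyHead]
      have hcomp : ((p ++ ·) ∘ (List.cons c)) = ((p ++ [c]) ++ ·) := by
        funext s; simp
      rw [hcomp]
      have hIH := ih (p ++ [c]) u rest
        (by intro h; rcases List.mem_append.1 h with h | h; exact hs h; simp at h; exact hc h.symm)
        (by simpa [List.append_assoc] using hl)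
      simpa [List.append_assoc] using hIH

lemma seg_eq_mask (b u : List Char) (h : b.length = u.length) :
    segLoop u (b.splitOn '*') 0 = (maskB b u = b : Bool) := by
  have := seg_gen b [] [] u (by simp) (by simpa using h)
  simp only [List.nil_append] at this
  rw [mh_id] at this
  simpa [List.splitOn] using this

lemma outer_eq_loop (user ban : List String) (h : ban.length ≤ user.length) (i : Nat) :
    checkOuter user ban i = checkBLoop ((ban.drop i).zip (user.drop i)) := by
  induction hn : ban.length - i using Nat.strong_induction_on generalizing i with
  | _ n ih =>
    rw [checkOuter]
    by_cases hi : i < ban.length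
    · have hiu : i < user.length := by omega
      have hb : ban.drop i = ban[i] :: ban.drop (i+1) := List.drop_eq_getElem_cons hi
      have hu : user.drop i = user[i] :: user.drop (i+1) := List.drop_eq_getElem_cons hiu
      have hgb : ban.getD i "" = ban[i] := by simp [List.getD, List.getElem?_eq_getElem hi]
      have hgu : user.getD i "" = user[i] := by simp [List.getD, List.getElem?_eq_getElem hiu]
      have hrec := ih (ban.length - (i+1)) (by omega) (i+1) rfl
      simp only [hi, dif_pos, hb, hu, hgb, hgu, List.zip_cons_cons, checkBLoop]
      by_cases hlen : (ban[i]).toList.length = (user[i]).toList.length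
      · have hinner := inner_eq_mask (ban[i]).toList (user[i]).toList hlen 0
        simp only [List.drop_zero] at hinner
        have hseg := seg_eq_mask (ban[i]).toList (user[i]).toList hlen
        by_cases hm : maskB (ban[i]).toList (user[i]).toList = (ban[i]).toList
        · simp [hlen, hinner, hseg, hm, hrec]
        · simp [hlen, hinner, hseg, hm]
      · have hlen' : ¬ ((ban[i]).length = (user[i]).length) := by simpa using hlen
        simp [hlen']
    · have hbd : ban.drop i = [] := List.drop_eq_nil_of_le (by omega)
      simp [hi, hbd, checkBLoop]

-- ===== VERDICT (by name: the statement is the Claim_ definition above) =====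
theorem check_spec : Claim_equal_check := by
  intro user ban _ hpre
  unfold Spec_check check check_alt
  simpa using outer_eq_loop user ban hpre 0
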